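-- pv_equiv track=rewrite | github.com/princeton-vl/infinigen | infinigen/terrain/utils/kernelizer_util.py | var_list
-- ===== SOURCE A (Python) =====
-- class Vars:
--     Position = "position"
--     Normal = "normal"
--     Offset = "offset"
--     SDF = "sdf"
--
-- def var_list(in_vars, imp_vars, out_vars, collective_style):
--     code = []
--     for var in in_vars:
--         dtype = in_vars[var]
--         code.append(f"{dtype} {var}")
--     if collective_style:
--         imp_vars_of_type = {}
--         for var in sorted(imp_vars.keys()):
--             if var in [Vars.Position, Vars.Normal]: continue
--             dtype = imp_vars[var][0]
--             if dtype in imp_vars_of_type: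
--                 imp_vars_of_type[dtype].append(var)
--             else:
--                 imp_vars_of_type[dtype] = [var]
--         if Vars.Position in imp_vars:
--             code.append(f"float3_nonbuiltin {Vars.Position}")
--         if Vars.Normal in imp_vars:
--             code.append(f"float3_nonbuiltin {Vars.Normal}")
--         for dtype in sorted(imp_vars_of_type.keys()):
--             code.append(f"POINTER_OR_REFERENCE_ARG {dtype} *{dtype}_vars")
--     else:
--         for var in sorted(imp_vars.keys()):
--             dtype = imp_vars[var][0]
--             code.append(f"{dtype} {var}")
--     for var in out_vars:
--         dtype = out_vars[var]
--         code.append(f"POINTER_OR_REFERENCE_ARG {dtype} *{var}")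
--     return ",".join(code)
-- ===== SOURCE B (Python) =====
-- class Vars:
--     Position = "position"
--     Normal = "normal"
--     Offset = "offset"
--     SDF = "sdf"
--
-- def var_list(in_vars, imp_vars, out_vars, collective_style):
--     # every fragment is written with a leading comma; the spare one is cut at the end
--     out = ""
--     for var, dtype in in_vars.items():
--         out += f",{dtype} {var}"
--     if collective_style:
--         if Vars.Position in imp_vars:
--             out += f",float3_nonbuiltin {Vars.Position}"
--         if Vars.Normal in imp_vars:
--             out += f",float3_nonbuiltin {Vars.Normal}"
--         # sort the dtype multiset, then skip adjacent repeats: the distinct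
--         # dtypes in sorted order, with no grouping dict or set
--         dtypes = sorted(dt[0] for var, dt in imp_vars.items()
--                         if var != Vars.Position and var != Vars.Normal)
--         prev = None
--         for d in dtypes:
--             if d != prev:
--                 out += f",POINTER_OR_REFERENCE_ARG {d} *{d}_vars"
--             prev = d
--     else:
--         for var in sorted(imp_vars):
--             out += f",{imp_vars[var][0]} {var}"
--     for var, dtype in out_vars.items():
--         out += f",POINTER_OR_REFERENCE_ARG {dtype} *{var}"
--     return out[1:]
-- ===== Notes on version B (the rewrite author's own statement) =====
-- stated objective: alternative
-- what changed: B builds the result directly in a string accumulator, appending every fragment with a leading comma and slicing the spare comma off at the end instead of A's list-append-then-join, and replaces A's dtype-grouping dict (whose value lists A never reads) by sorting the dtype multiset and emitting each dtype while skipping adjacent repeats with a prev marker.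
import Mathlib
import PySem

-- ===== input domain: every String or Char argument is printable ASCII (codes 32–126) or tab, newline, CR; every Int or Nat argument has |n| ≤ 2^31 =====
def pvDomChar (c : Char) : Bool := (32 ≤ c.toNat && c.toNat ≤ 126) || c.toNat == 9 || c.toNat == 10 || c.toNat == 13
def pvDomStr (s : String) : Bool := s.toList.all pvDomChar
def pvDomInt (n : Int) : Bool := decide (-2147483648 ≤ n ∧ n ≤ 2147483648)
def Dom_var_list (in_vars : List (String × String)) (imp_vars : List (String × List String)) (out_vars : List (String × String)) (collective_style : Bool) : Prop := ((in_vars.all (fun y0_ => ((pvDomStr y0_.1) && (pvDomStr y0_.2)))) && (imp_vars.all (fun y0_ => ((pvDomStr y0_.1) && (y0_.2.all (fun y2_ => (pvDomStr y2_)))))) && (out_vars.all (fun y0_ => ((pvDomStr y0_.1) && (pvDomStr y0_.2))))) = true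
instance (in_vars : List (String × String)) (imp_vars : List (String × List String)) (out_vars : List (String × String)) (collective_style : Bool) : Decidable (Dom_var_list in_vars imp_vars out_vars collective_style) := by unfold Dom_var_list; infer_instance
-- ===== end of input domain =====

-- B builds the result directly in a string accumulator (every fragment gets a leading
-- comma, the spare one is sliced off at the end — no list, no join) and replaces A's
-- dtype-grouping dict by sorting the dtype multiset and skipping adjacent repeats;
-- objective: alternative (same cost, different mechanism).

-- ===== PORT A =====
-- literal transliteration of A: dicts are PySem.Dict (built once from the assoc lists),
-- `for var in d` iterates d.keys with a lookup for the value, `imp_vars[var][0]` is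
-- pyGetD … 0 "" (the "" default is only reached where Python raises IndexError — excluded by Pre_).
def var_list (in_vars : List (String × String)) (imp_vars : List (String × List String)) (out_vars : List (String × String)) (collective_style : Bool) : String :=
  let dIn : PySem.Dict String String := PySem.Dict.ofList in_vars
  let dImp : PySem.Dict String (List String) := PySem.Dict.ofList imp_vars
  let dOut : PySem.Dict String String := PySem.Dict.ofList out_vars
  let code : List String :=
    dIn.keys.foldl (fun code var => code ++ [dIn.getD var "" ++ " " ++ var]) []
  let code : List String :=
    if collective_style then
      let grouped : PySem.Dict String (List String) :=
        (PySem.List.sorted dImp.keys (fun x => x) false).foldl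
          (fun d var =>
            if var ∈ (["position", "normal"] : List String) then d
            else
              let dtype := PySem.List.pyGetD (dImp.getD var []) 0 ""
              if d.contains dtype then d.insert dtype (d.getD dtype [] ++ [var])
              else d.insert dtype [var])
          PySem.Dict.empty
      let code := if dImp.contains "position" then code ++ ["float3_nonbuiltin position"] else code
      let code := if dImp.contains "normal" then code ++ ["float3_nonbuiltin normal"] else code
      (PySem.List.sorted grouped.keys (fun x => x) false).foldl
        (fun code dtype => code ++ ["POINTER_OR_REFERENCE_ARG " ++ dtype ++ " *" ++ dtype ++ "_vars"]) code
    else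
      (PySem.List.sorted dImp.keys (fun x => x) false).foldl
        (fun code var => code ++ [PySem.List.pyGetD (dImp.getD var []) 0 "" ++ " " ++ var]) code
  let code : List String :=
    dOut.keys.foldl (fun code var => code ++ ["POINTER_OR_REFERENCE_ARG " ++ dOut.getD var "" ++ " *" ++ var]) code
  PySem.Str.join "," code

-- ===== PORT B =====
-- literal transliteration of Source B: every fragment is appended with a leading comma to
-- the string accumulator (`out += f",..."`), the generator inside sorted(...) is
-- filter-then-map over imp_vars.items(), the prev/adjacent-skip loop is a fold over
-- (accumulator, prev : Option String), and `out[1:]` is PySem.Str.slice.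
def var_list_alt (in_vars : List (String × String)) (imp_vars : List (String × List String)) (out_vars : List (String × String)) (collective_style : Bool) : String :=
  let dIn : PySem.Dict String String := PySem.Dict.ofList in_vars
  let dImp : PySem.Dict String (List String) := PySem.Dict.ofList imp_vars
  let dOut : PySem.Dict String String := PySem.Dict.ofList out_vars
  let out : String := ""
  let out := dIn.items.foldl (fun out p => out ++ ("," ++ (p.2 ++ " " ++ p.1))) out
  let out :=
    if collective_style then
      let out := if dImp.contains "position" then out ++ ("," ++ "float3_nonbuiltin position") else out
      let out := if dImp.contains "normal" then out ++ ("," ++ "float3_nonbuiltin normal") else out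
      let dtypes : List String :=
        PySem.List.sorted
          ((dImp.items.filter (fun p => p.1 != "position" && p.1 != "normal")).map
            (fun p => PySem.List.pyGetD p.2 0 ""))
          (fun x => x) false
      (dtypes.foldl
        (fun (s : String × Option String) d =>
          (if some d = s.2 then s.1
           else s.1 ++ ("," ++ ("POINTER_OR_REFERENCE_ARG " ++ d ++ " *" ++ d ++ "_vars")),
           some d))
        (out, none)).1
    else
      (PySem.List.sorted dImp.keys (fun x => x) false).foldl
        (fun out var => out ++ ("," ++ (PySem.List.pyGetD (dImp.getD var []) 0 "" ++ " " ++ var))) out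
  let out := dOut.items.foldl (fun out p => out ++ ("," ++ ("POINTER_OR_REFERENCE_ARG " ++ p.2 ++ " *" ++ p.1))) out
  PySem.Str.slice out (some 1) none

-- ===== PRECONDITION & SPEC =====
-- Pre_ excludes exactly the inputs where Python A raises IndexError: an imp_vars entry
-- with an empty dtype list, unless collective_style shields it as position/normal.
def Pre_var_list (in_vars : List (String × String)) (imp_vars : List (String × List String)) (out_vars : List (String × String)) (collective_style : Bool) : Prop :=
  ∀ p ∈ (PySem.Dict.ofList imp_vars : PySem.Dict String (List String)).items,
    (collective_style = true ∧ p.1 ∈ (["position", "normal"] : List String)) ∨ p.2 ≠ []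
instance (in_vars : List (String × String)) (imp_vars : List (String × List String)) (out_vars : List (String × String)) (collective_style : Bool) : Decidable (Pre_var_list in_vars imp_vars out_vars collective_style) := by unfold Pre_var_list; infer_instance
def pvWitness_var_list : (List (String × String)) × (List (String × List String)) × (List (String × String)) × Bool :=
  ([("x", "float")], [("position", []), ("a", ["int", "z"]), ("b", ["int"])], [("sdf", "float")], true)

def Spec_var_list (in_vars : List (String × String)) (imp_vars : List (String × List String)) (out_vars : List (String × String)) (collective_style : Bool) (out : String) : Prop := out = var_list_alt in_vars imp_vars out_vars collective_style
instance (in_vars : List (String × String)) (imp_vars : List (String × List String)) (out_vars : List (String × String)) (collective_style : Bool) (out : String) : Decidable (Spec_var_list in_vars imp_vars out_vars collective_style out) := by unfold Spec_var_list; infer_instance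

-- ===== CLAIM (what is proved, stated in full; the proofs are below) =====
def Claim_equal_var_list : Prop := ∀ (in_vars : List (String × String)) (imp_vars : List (String × List String)) (out_vars : List (String × String)) (collective_style : Bool), Dom_var_list in_vars imp_vars out_vars collective_style → Pre_var_list in_vars imp_vars out_vars collective_style → Spec_var_list in_vars imp_vars out_vars collective_style (var_list in_vars imp_vars out_vars collective_style)

-- ===== LEMMAS AND PROOFS =====

-- B's prev-skip pass, extracted: the list of elements the loop keeps
def dedupAdj (prev : Option String) : List String → List String
  | [] => []
  | d :: t => if some d = prev then dedupAdj (some d) t else d :: dedupAdj (some d) t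

-- comma-prefixed fragments of a nonempty piece list ARE a comma-join with one spare comma
lemma flat_comma_cons (a : List Char) (t : List (List Char)) :
    (a :: t).flatMap (fun p => ',' :: p) = ',' :: PySem.Chars.join [','] (a :: t) := by
  induction t generalizing a with
  | nil => simp [PySem.Chars.join_singleton]
  | cons b t' ih =>
    rw [List.flatMap_cons, ih b, PySem.Chars.join_cons_cons]
    simp

-- dropping the spare leading comma recovers the comma-join
lemma join_eq_drop (pieces : List String) :
    PySem.Chars.join ",".toList (List.map String.toList pieces)
      = (pieces.flatMap (fun p => ',' :: p.toList)).drop 1 := by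
  cases pieces with
  | nil => simp [PySem.Chars.join_nil]
  | cons a t =>
    rw [← List.flatMap_map String.toList (fun p => ',' :: p) (a :: t), List.map_cons,
        flat_comma_cons]
    simp

-- a loop 'out += "," + f(x)' appends the comma-prefixed fragments
lemma foldl_cat {α : Type} (f : α → String) (l : List α) (s : String) :
    (l.foldl (fun out x => out ++ ("," ++ f x)) s).toList
      = s.toList ++ l.flatMap (fun x => ',' :: (f x).toList) := by
  induction l generalizing s with
  | nil => simp
  | cons a t ih =>
    rw [List.foldl_cons, ih, List.flatMap_cons]
    simp [String.toList_append]

-- B's prev/skip fold computes a comma-append fold over dedupAdj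
lemma fold_skip_eq_dedupAdj (piece : String → String) (l : List String) :
    ∀ (out : String) (prev : Option String),
    (l.foldl
      (fun (s : String × Option String) d =>
        (if some d = s.2 then s.1 else s.1 ++ ("," ++ piece d), some d)) (out, prev)).1
      = (dedupAdj prev l).foldl (fun o d => o ++ ("," ++ piece d)) out := by
  induction l with
  | nil => intro out prev; simp [dedupAdj]
  | cons d t ih =>
    intro out prev
    simp only [List.foldl_cons, dedupAdj]
    by_cases h : some d = prev
    · rw [if_pos h, if_pos h, ih]
    · rw [if_neg h, if_neg h, ih, List.foldl_cons]

-- membership in dedupAdj over a sorted tail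
lemma mem_dedupAdj (l : List String) (hl : l.Pairwise (· ≤ ·)) :
    ∀ (prev : Option String), (∀ p, prev = some p → ∀ x ∈ l, p ≤ x) →
    ∀ a, a ∈ dedupAdj prev l ↔ a ∈ l ∧ some a ≠ prev := by
  induction l with
  | nil => intro prev _ a; simp [dedupAdj]
  | cons d t ih =>
    intro prev hprev a
    have hd : ∀ x ∈ t, d ≤ x := fun x hx => (List.pairwise_cons.1 hl).1 x hx
    have ht := (List.pairwise_cons.1 hl).2
    have hih := ih ht (some d)
      (by intro p hp x hx; obtain rfl : d = p := Option.some.inj hp; exact hd x hx) a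
    simp only [dedupAdj]
    by_cases h : some d = prev
    · subst h
      rw [if_pos rfl, hih]
      constructor
      · rintro ⟨h1, h2⟩; exact ⟨List.mem_cons_of_mem d h1, h2⟩
      · rintro ⟨h1, h2⟩
        rcases List.mem_cons.1 h1 with rfl | h1
        · exact absurd rfl h2
        · exact ⟨h1, h2⟩
    · rw [if_neg h]
      constructor
      · intro hmem
        rcases List.mem_cons.1 hmem with rfl | hmem
        · exact ⟨List.mem_cons_self, h⟩
        · obtain ⟨h1, h2⟩ := hih.1 hmem
          refine ⟨List.mem_cons_of_mem d h1, ?_⟩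
          rcases prev with _ | p
          · simp
          · intro hc
            obtain rfl : a = p := Option.some.inj hc
            have hpd : a ≤ d := hprev a rfl d List.mem_cons_self
            have hda : d ≤ a := hd a h1
            exact h2 (congrArg some (le_antisymm hpd hda))
      · rintro ⟨h1, h2⟩
        rcases List.mem_cons.1 h1 with rfl | h1
        · exact List.mem_cons_self
        · by_cases had : a = d
          · exact had ▸ List.mem_cons_self
          · exact List.mem_cons_of_mem d
              (hih.2 ⟨h1, fun hc => had (Option.some.inj hc)⟩)

-- over a sorted list, dedupAdj yields a strictly increasing list
lemma dedupAdj_pairwise_lt (l : List String) (hl : l.Pairwise (· ≤ ·)) :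
    ∀ (prev : Option String), (∀ p, prev = some p → ∀ x ∈ l, p ≤ x) →
    (dedupAdj prev l).Pairwise (· < ·) := by
  induction l with
  | nil => intro prev _; simp [dedupAdj]
  | cons d t ih =>
    intro prev hprev
    have hd : ∀ x ∈ t, d ≤ x := fun x hx => (List.pairwise_cons.1 hl).1 x hx
    have ht := (List.pairwise_cons.1 hl).2
    have htail := ih ht (some d) (by rintro p hp x hx; cases hp; exact hd x hx)
    simp only [dedupAdj]
    by_cases h : some d = prev
    · rw [if_pos h]; exact htail
    · rw [if_neg h]
      refine List.pairwise_cons.2 ⟨?_, htail⟩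
      intro a ha
      have := (mem_dedupAdj t ht (some d)
        (by rintro p hp x hx; cases hp; exact hd x hx) a).1 ha
      exact lt_of_le_of_ne (hd a this.1) (fun hc => this.2 (by rw [hc]))

-- permutation-invariance of Python's set(xs)
lemma ofList_perm {α : Type} [BEq α] [LawfulBEq α] {l1 l2 : List α} (h : l1.Perm l2) :
    (PySem.Set.ofList l1).Perm (PySem.Set.ofList l2) :=
  (List.perm_ext_iff_of_nodup (PySem.Set.nodup_ofList l1) (PySem.Set.nodup_ofList l2)).2
    (fun a => by simp [PySem.Set.mem_ofList, h.mem_iff])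

-- dedupAdj of the sorted dtype multiset IS sorted(set(...)) of it
lemma dedupAdj_sorted_eq (base : List String) :
    dedupAdj none (PySem.List.sorted base (fun x => x) false)
      = PySem.List.sorted (PySem.Set.ofList base) (fun x => x) false := by
  have hsp : (PySem.List.sorted base (fun x => x) false).Pairwise (· ≤ ·) :=
    PySem.List.sorted_pairwise base (fun x => x)
  have hmem := mem_dedupAdj (PySem.List.sorted base (fun x => x) false) hsp none (by simp)
  have hlt := dedupAdj_pairwise_lt (PySem.List.sorted base (fun x => x) false) hsp none (by simp)
  refine (PySem.List.sorted_eq_of_perm_of_pairwise_lt _ _ _ ?_ hlt).symm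
  refine (List.perm_ext_iff_of_nodup (hlt.imp ne_of_lt) (PySem.Set.nodup_ofList base)).2 ?_
  intro a
  rw [hmem a, PySem.Set.mem_ofList, PySem.List.mem_sorted]
  simp

-- the in_vars loop over the dict's keys with a value lookup is a map over its items
lemma foldl_in_eq_map_items (d : PySem.Dict String String) (hnd : d.keys.Nodup) (acc : List String) :
    d.keys.foldl (fun code var => code ++ [d.getD var "" ++ " " ++ var]) acc
      = acc ++ d.items.map (fun p => p.2 ++ " " ++ p.1) := by
  rw [PySem.List.foldl_append_singleton_eq_map, PySem.Dict.items_eq_map_keys d hnd ""]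
  simp

-- the out_vars loop, likewise
lemma foldl_out_eq_map_items (d : PySem.Dict String String) (hnd : d.keys.Nodup) (acc : List String) :
    d.keys.foldl (fun code var => code ++ ["POINTER_OR_REFERENCE_ARG " ++ d.getD var "" ++ " *" ++ var]) acc
      = acc ++ d.items.map (fun p => "POINTER_OR_REFERENCE_ARG " ++ p.2 ++ " *" ++ p.1) := by
  rw [PySem.List.foldl_append_singleton_eq_map, PySem.Dict.items_eq_map_keys d hnd ""]
  simp

-- the keys of A's grouping dict: first occurrences of the dtypes of the kept variables
lemma grouped_keys_eq (dImp : PySem.Dict String (List String)) (l : List String) :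
    (l.foldl
        (fun d var =>
          if var ∈ (["position", "normal"] : List String) then d
          else
            if d.contains (PySem.List.pyGetD (dImp.getD var []) 0 "") then
              d.insert (PySem.List.pyGetD (dImp.getD var []) 0 "")
                (d.getD (PySem.List.pyGetD (dImp.getD var []) 0 "") [] ++ [var])
            else d.insert (PySem.List.pyGetD (dImp.getD var []) 0 "") [var])
        (PySem.Dict.empty : PySem.Dict String (List String))).keys
      = PySem.Set.ofList
          ((l.filter (fun var => var ∉ (["position", "normal"] : List String))).map
            (fun var => PySem.List.pyGetD (dImp.getD var []) 0 "")) := by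
  have hstep : (fun (d : PySem.Dict String (List String)) var =>
        if var ∈ (["position", "normal"] : List String) then d
        else
          if d.contains (PySem.List.pyGetD (dImp.getD var []) 0 "") then
            d.insert (PySem.List.pyGetD (dImp.getD var []) 0 "")
              (d.getD (PySem.List.pyGetD (dImp.getD var []) 0 "") [] ++ [var])
          else d.insert (PySem.List.pyGetD (dImp.getD var []) 0 "") [var])
      = (fun d var =>
          if ((fun var => var ∉ (["position", "normal"] : List String) : String → Bool) var) then
            d.insert (PySem.List.pyGetD (dImp.getD var []) 0 "")
              ((fun (d : PySem.Dict String (List String)) var =>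
                  if d.contains (PySem.List.pyGetD (dImp.getD var []) 0 "") then
                    d.getD (PySem.List.pyGetD (dImp.getD var []) 0 "") [] ++ [var]
                  else [var]) d var)
          else d) := by
    funext d var
    by_cases hm : var ∈ (["position", "normal"] : List String) <;>
      simp only [hm, decide_true, decide_false, if_true, if_false, not_true, not_false_iff]
    · rfl
    · split <;> rfl
  rw [hstep, ← List.foldl_filter, PySem.Dict.keys_foldl_insert_key, PySem.Dict.keys_empty,
      PySem.Set.update_nil_left]

-- A's dtype list (over the sorted keys) is a permutation of B's (over the items)
lemma dtypes_perm (imp_vars : List (String × List String)) :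
    (((PySem.List.sorted (PySem.Dict.ofList imp_vars : PySem.Dict String (List String)).keys (fun x => x) false).filter
        (fun var => var ∉ (["position", "normal"] : List String))).map
      (fun var => PySem.List.pyGetD ((PySem.Dict.ofList imp_vars : PySem.Dict String (List String)).getD var []) 0 "")).Perm
    (((PySem.Dict.ofList imp_vars : PySem.Dict String (List String)).items.filter
        (fun p => p.1 ∉ (["position", "normal"] : List String))).map
      (fun p => PySem.List.pyGetD p.2 0 "")) := by
  set dImp : PySem.Dict String (List String) := PySem.Dict.ofList imp_vars with hd
  have hitems := PySem.Dict.items_eq_map_keys dImp (PySem.Dict.nodup_keys_ofList imp_vars) []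
  rw [hitems, List.filter_map, List.map_map]
  exact (((PySem.List.sorted_perm dImp.keys (fun x => x) false).filter _).map _)

-- the sorted keys of A's grouping dict coincide with B's deduped sorted dtype list
lemma sorted_grouped_eq (imp_vars : List (String × List String)) :
    PySem.List.sorted
      ((PySem.List.sorted (PySem.Dict.ofList imp_vars : PySem.Dict String (List String)).keys (fun x => x) false).foldl
        (fun d var =>
          if var ∈ (["position", "normal"] : List String) then d
          else
            if d.contains (PySem.List.pyGetD ((PySem.Dict.ofList imp_vars : PySem.Dict String (List String)).getD var []) 0 "") then
              d.insert (PySem.List.pyGetD ((PySem.Dict.ofList imp_vars : PySem.Dict String (List String)).getD var []) 0 "")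
                (d.getD (PySem.List.pyGetD ((PySem.Dict.ofList imp_vars : PySem.Dict String (List String)).getD var []) 0 "") [] ++ [var])
            else d.insert (PySem.List.pyGetD ((PySem.Dict.ofList imp_vars : PySem.Dict String (List String)).getD var []) 0 "") [var])
        (PySem.Dict.empty : PySem.Dict String (List String))).keys
      (fun x => x) false
    = dedupAdj none
        (PySem.List.sorted
          (((PySem.Dict.ofList imp_vars : PySem.Dict String (List String)).items.filter
              (fun p => p.1 != "position" && p.1 != "normal")).map
            (fun p => PySem.List.pyGetD p.2 0 ""))
          (fun x => x) false) := by
  have hfil : ((PySem.Dict.ofList imp_vars : PySem.Dict String (List String)).items.filter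
      (fun p => p.1 != "position" && p.1 != "normal"))
      = ((PySem.Dict.ofList imp_vars : PySem.Dict String (List String)).items.filter
      (fun p => p.1 ∉ (["position", "normal"] : List String))) := by
    apply List.filter_congr
    intro p _
    by_cases h1 : p.1 = "position" <;> by_cases h2 : p.1 = "normal" <;> simp [h1, h2]
  rw [hfil, dedupAdj_sorted_eq, grouped_keys_eq]
  apply PySem.List.sorted_eq_of_perm_of_pairwise_lt
  · exact ((PySem.List.sorted_perm _ _ _).trans
      ((ofList_perm (dtypes_perm imp_vars)).symm)).symm.symm
  · exact PySem.List.sorted_ofList_pairwise_lt _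


-- the shared tail of the collective branch: A's dtype loop + out loop, against
-- B's skip loop + out loop on the comma-prefixed accumulator
lemma tail_eq (imp_vars : List (String × List String)) (out_vars : List (String × String))
    (L : List String) (s : String)
    (hs : s.toList = L.flatMap (fun p => ',' :: p.toList)) :
    PySem.Chars.join ",".toList
      (List.map String.toList
        (((PySem.List.sorted
            ((PySem.List.sorted (PySem.Dict.ofList imp_vars : PySem.Dict String (List String)).keys (fun x => x) false).foldl
              (fun d var =>
                if var ∈ (["position", "normal"] : List String) then d
                else
                  if d.contains (PySem.List.pyGetD ((PySem.Dict.ofList imp_vars : PySem.Dict String (List String)).getD var []) 0 "") then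
                    d.insert (PySem.List.pyGetD ((PySem.Dict.ofList imp_vars : PySem.Dict String (List String)).getD var []) 0 "")
                      (d.getD (PySem.List.pyGetD ((PySem.Dict.ofList imp_vars : PySem.Dict String (List String)).getD var []) 0 "") [] ++ [var])
                  else d.insert (PySem.List.pyGetD ((PySem.Dict.ofList imp_vars : PySem.Dict String (List String)).getD var []) 0 "") [var])
              (PySem.Dict.empty : PySem.Dict String (List String))).keys
            (fun x => x) false).foldl
            (fun code dtype => code ++ ["POINTER_OR_REFERENCE_ARG " ++ dtype ++ " *" ++ dtype ++ "_vars"]) L)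
          ++ (PySem.Dict.ofList out_vars : PySem.Dict String String).items.map
              (fun p => "POINTER_OR_REFERENCE_ARG " ++ p.2 ++ " *" ++ p.1)))
      = ((PySem.Dict.ofList out_vars : PySem.Dict String String).items.foldl
          (fun out p => out ++ ("," ++ ("POINTER_OR_REFERENCE_ARG " ++ p.2 ++ " *" ++ p.1)))
          (((PySem.List.sorted
              (((PySem.Dict.ofList imp_vars : PySem.Dict String (List String)).items.filter
                  (fun p => p.1 != "position" && p.1 != "normal")).map
                (fun p => PySem.List.pyGetD p.2 0 ""))
              (fun x => x) false).foldl
            (fun (s : String × Option String) d =>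
              (if some d = s.2 then s.1
               else s.1 ++ ("," ++ ("POINTER_OR_REFERENCE_ARG " ++ d ++ " *" ++ d ++ "_vars")),
               some d))
            (s, none)).1)).toList.drop 1 := by
  rw [fold_skip_eq_dedupAdj (piece := fun d => "POINTER_OR_REFERENCE_ARG " ++ d ++ " *" ++ d ++ "_vars")]
  rw [foldl_cat (f := fun p : String × String => "POINTER_OR_REFERENCE_ARG " ++ p.2 ++ " *" ++ p.1)]
  rw [foldl_cat (f := fun d => "POINTER_OR_REFERENCE_ARG " ++ d ++ " *" ++ d ++ "_vars")]
  rw [hs, PySem.List.foldl_append_singleton_eq_map, sorted_grouped_eq imp_vars, join_eq_drop]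
  simp [List.flatMap_append, List.flatMap_map]

-- ===== VERDICT (by name: the statement is the Claim_ definition above) =====
theorem var_list_spec : Claim_equal_var_list := by
  intro in_vars imp_vars out_vars collective_style _hdom _hpre
  unfold Spec_var_list var_list var_list_alt
  simp only []
  rw [foldl_in_eq_map_items _ (PySem.Dict.nodup_keys_ofList in_vars)]
  rw [foldl_out_eq_map_items _ (PySem.Dict.nodup_keys_ofList out_vars)]
  rw [← String.toList_inj]
  simp only [PySem.Str.toList_slice, PySem.Chars.slice, PySem.List.slice_from _ (by norm_num : (0:Int) ≤ 1), Int.toNat_one]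
  rw [PySem.Str.toList_join]
  simp only [List.nil_append]
  have hIn := foldl_cat (f := fun p : String × String => p.2 ++ " " ++ p.1)
    (PySem.Dict.ofList in_vars : PySem.Dict String String).items ""
  cases collective_style
  · rw [if_neg (by simp), if_neg (by simp)]
    rw [PySem.List.foldl_append_singleton_eq_map]
    rw [foldl_cat (f := fun p : String × String => "POINTER_OR_REFERENCE_ARG " ++ p.2 ++ " *" ++ p.1)]
    rw [foldl_cat (f := fun var =>
        PySem.List.pyGetD ((PySem.Dict.ofList imp_vars : PySem.Dict String (List String)).getD var []) 0 "" ++ " " ++ var)]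
    rw [hIn, join_eq_drop]
    simp [List.flatMap_append, List.flatMap_map]
  · rw [if_pos rfl, if_pos rfl]
    by_cases hpos : (PySem.Dict.ofList imp_vars : PySem.Dict String (List String)).contains "position" = true <;>
      by_cases hnorm : (PySem.Dict.ofList imp_vars : PySem.Dict String (List String)).contains "normal" = true
    · rw [if_pos hpos, if_pos hpos, if_pos hnorm, if_pos hnorm]
      rw [tail_eq imp_vars out_vars
          ((((PySem.Dict.ofList in_vars : PySem.Dict String String).items.map (fun p => p.2 ++ " " ++ p.1))
            ++ ["float3_nonbuiltin position"]) ++ ["float3_nonbuiltin normal"])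
          (((List.foldl (fun out p => out ++ ("," ++ (p.2 ++ " " ++ p.1))) "" (PySem.Dict.ofList in_vars : PySem.Dict String String).items) ++ ("," ++ "float3_nonbuiltin position")) ++ ("," ++ "float3_nonbuiltin normal"))
          (by rw [String.toList_append, String.toList_append, hIn]
              simp [List.flatMap_append, String.toList_append, List.flatMap_map])]
    · rw [if_pos hpos, if_pos hpos, if_neg hnorm, if_neg hnorm]
      rw [tail_eq imp_vars out_vars
          ((((PySem.Dict.ofList in_vars : PySem.Dict String String).items.map (fun p => p.2 ++ " " ++ p.1)))
            ++ ["float3_nonbuiltin position"])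
          ((List.foldl (fun out p => out ++ ("," ++ (p.2 ++ " " ++ p.1))) "" (PySem.Dict.ofList in_vars : PySem.Dict String String).items) ++ ("," ++ "float3_nonbuiltin position"))
          (by rw [String.toList_append, hIn]
              simp [List.flatMap_append, String.toList_append, List.flatMap_map])]
    · rw [if_neg hpos, if_neg hpos, if_pos hnorm, if_pos hnorm]
      rw [tail_eq imp_vars out_vars
          ((((PySem.Dict.ofList in_vars : PySem.Dict String String).items.map (fun p => p.2 ++ " " ++ p.1)))
            ++ ["float3_nonbuiltin normal"])
          ((List.foldl (fun out p => out ++ ("," ++ (p.2 ++ " " ++ p.1))) "" (PySem.Dict.ofList in_vars : PySem.Dict String String).items) ++ ("," ++ "float3_nonbuiltin normal"))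
          (by rw [String.toList_append, hIn]
              simp [List.flatMap_append, String.toList_append, List.flatMap_map])]
    · rw [if_neg hpos, if_neg hpos, if_neg hnorm, if_neg hnorm]
      rw [tail_eq imp_vars out_vars
          ((PySem.Dict.ofList in_vars : PySem.Dict String String).items.map (fun p => p.2 ++ " " ++ p.1))
          (List.foldl (fun out p => out ++ ("," ++ (p.2 ++ " " ++ p.1))) "" (PySem.Dict.ofList in_vars : PySem.Dict String String).items)
          (by rw [hIn]; simp [List.flatMap_map])]
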